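-- pv_equiv track=rewrite | github.com/slafragola93/ECommerceManagerAPI | src/services/core/tool.py | valida_piva
-- ===== SOURCE A (Python) =====
-- def valida_piva(piva: str) -> tuple[bool, str | None]:
--     """
--     Valida una Partita IVA italiana usando l'algoritmo di controllo del check digit
--
--     Args:
--         piva: Stringa contenente la P.IVA da validare
--
--     Returns:
--         tuple[bool, str | None]: (True, None) se valida, (False, messaggio_errore) se non valida
--
--     Esempio:
--         valida_piva("12345678901") → (True, None) se valida
--         valida_piva("12345678900") → (False, "P.IVA non valida: check digit errato")
--     """
--     if not piva or not piva.isdigit() or len(piva) != 11: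
--         return False, "P.IVA deve contenere 11 cifre"
--
--     digits = [int(d) for d in piva]
--
--     somma = 0
--     for i in range(10):
--         d = digits[i]
--         # posizioni: 1-based
--         if (i + 1) % 2 == 0:  # pari
--             d *= 2
--             if d > 9:
--                 d -= 9
--         somma += d
--
--     check_calcolato = (10 - (somma % 10)) % 10
--
--     if check_calcolato != digits[10]:
--         return False, "P.IVA non valida: check digit errato"
--
--     return True, None
-- ===== SOURCE B (Python) =====
-- # Table-driven variant: DBL encodes "double, subtract 9 if >9"; validity is
-- # tested as "weighted total including the check digit is divisible by 10".
-- DBL = [0, 2, 4, 6, 8, 1, 3, 5, 7, 9]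
--
--
-- def valida_piva(piva: str) -> tuple[bool, str | None]:
--     if not piva or not piva.isdigit() or len(piva) != 11:
--         return False, "P.IVA deve contenere 11 cifre"
--     digits = [int(d) for d in piva]
--     total = sum(digits[0::2]) + sum(DBL[d] for d in digits[1:10:2])
--     if total % 10 != 0:
--         return False, "P.IVA non valida: check digit errato"
--     return True, None
-- ===== Notes on version B (the rewrite author's own statement) =====
-- stated objective: simpler
-- what changed: Replaces the per-position parity branch and the conditional double-and-subtract-nine arithmetic by a precomputed lookup table applied over two step-2 slices, and replaces the derived-check-digit comparison by a single mod-10 divisibility test of the total including the check digit.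
import Mathlib
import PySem

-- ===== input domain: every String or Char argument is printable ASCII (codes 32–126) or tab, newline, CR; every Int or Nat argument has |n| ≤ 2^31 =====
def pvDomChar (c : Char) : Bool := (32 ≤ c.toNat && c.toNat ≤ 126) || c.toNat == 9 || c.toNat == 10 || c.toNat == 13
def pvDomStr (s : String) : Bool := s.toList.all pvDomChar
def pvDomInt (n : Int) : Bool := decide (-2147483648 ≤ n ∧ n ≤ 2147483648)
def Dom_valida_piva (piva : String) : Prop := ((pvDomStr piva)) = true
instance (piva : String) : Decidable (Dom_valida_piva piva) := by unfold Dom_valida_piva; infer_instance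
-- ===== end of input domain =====

-- B replaces the per-position parity branch and the "double, subtract 9" arithmetic by a
-- constant lookup table over two step-2 slices, and tests validity as "weighted total
-- including the check digit is divisible by 10" (objective: simpler).

-- ===== PORT A =====
-- int(d) for a single character d: exact for '0'..'9'; both programs evaluate it only on
-- digit characters (the isdigit guard returned before this point otherwise).
def digitVal (c : Char) : Int := (c.toNat : Int) - 48

def valida_piva (piva : String) : Bool × Option String :=
  if piva.toList = [] ∨ PySem.Str.strIsdigit piva = false ∨ PySem.Str.len piva ≠ 11 then
    (false, some "P.IVA deve contenere 11 cifre")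
  else
    let digits : List Int := piva.toList.map digitVal
    let somma : Int := (PySem.List.pyRange 0 10 1).foldl (fun acc i =>
      let d := PySem.List.pyGetD digits i 0
      let d := if PySem.Int.mod (i + 1) 2 = 0 then
                 (let d2 := d * 2; if d2 > 9 then d2 - 9 else d2)
               else d
      acc + d) 0
    let check_calcolato := PySem.Int.mod (10 - PySem.Int.mod somma 10) 10
    if check_calcolato ≠ PySem.List.pyGetD digits 10 0 then
      (false, some "P.IVA non valida: check digit errato")
    else
      (true, none)

-- ===== PORT B =====
def DBL : List Int := [0, 2, 4, 6, 8, 1, 3, 5, 7, 9]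

def valida_piva_alt (piva : String) : Bool × Option String :=
  if piva.toList = [] ∨ PySem.Str.strIsdigit piva = false ∨ PySem.Str.len piva ≠ 11 then
    (false, some "P.IVA deve contenere 11 cifre")
  else
    let digits : List Int := piva.toList.map digitVal
    let total : Int :=
      ((PySem.List.slice? digits (some 0) none 2).getD []).sum
      + (((PySem.List.slice? digits (some 1) (some 10) 2).getD []).map
           (fun d => PySem.List.pyGetD DBL d 0)).sum
    if PySem.Int.mod total 10 ≠ 0 then
      (false, some "P.IVA non valida: check digit errato")
    else
      (true, none)

-- ===== PRECONDITION & SPEC =====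
def Spec_valida_piva (piva : String) (out : Bool × Option String) : Prop := out = valida_piva_alt piva
instance (piva : String) (out : Bool × Option String) : Decidable (Spec_valida_piva piva out) := by unfold Spec_valida_piva; infer_instance

-- ===== CLAIM (what is proved, stated in full; the proofs are below) =====
def Claim_equal_valida_piva : Prop := ∀ (piva : String), Dom_valida_piva piva → Spec_valida_piva piva (valida_piva piva)

-- ===== LEMMAS AND PROOFS =====

-- The DBL table encodes "double and subtract 9 if > 9" for a digit character's value.
theorem dbl_spec (c : Char) (h : PySem.Chars.isdigit c = true) :
    PySem.List.pyGetD DBL (digitVal c) 0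
      = (if digitVal c * 2 > 9 then digitVal c * 2 - 9 else digitVal c * 2) := by
  have hn : 48 ≤ c.toNat ∧ c.toNat ≤ 57 := by
    simp only [PySem.Chars.isdigit, Bool.and_eq_true, decide_eq_true_eq, Char.le_def,
      UInt32.le_iff_toNat_le] at h
    exact h
  obtain ⟨h1, h2⟩ := hn
  unfold digitVal
  interval_cases h : c.toNat <;> simp [h] <;> decide

-- Python's check-digit test ⟺ divisibility of the total including the check digit.
theorem check_iff (s d : Int) (h0 : 0 ≤ d) (h9 : d ≤ 9) :
    (PySem.Int.mod (10 - PySem.Int.mod s 10) 10 = d) ↔ PySem.Int.mod (s + d) 10 = 0 := by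
  simp only [PySem.Int.mod_eq_emod_of_pos (show (0:Int) < 10 by norm_num)]
  omega

theorem final_step (s d t : Int) (h0 : 0 ≤ d) (h9 : d ≤ 9) (ht : s + d = t)
    (X Y : Bool × Option String) :
    (if PySem.Int.mod (10 - PySem.Int.mod s 10) 10 ≠ d then X else Y)
      = (if PySem.Int.mod t 10 ≠ 0 then X else Y) := by
  have hiff := check_iff s d h0 h9
  subst ht
  by_cases h : PySem.Int.mod (10 - PySem.Int.mod s 10) 10 = d
  · rw [if_neg (by simpa using h), if_neg (by simpa using hiff.mp h)]
  · rw [if_pos h, if_pos (fun hc => h (hiff.mpr hc))]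

theorem digitVal_bounds (c : Char) (h : PySem.Chars.isdigit c = true) :
    0 ≤ digitVal c ∧ digitVal c ≤ 9 := by
  have h' : 48 ≤ c.toNat ∧ c.toNat ≤ 57 := by
    simp only [PySem.Chars.isdigit, Bool.and_eq_true, decide_eq_true_eq, Char.le_def,
      UInt32.le_iff_toNat_le] at h
    exact h
  unfold digitVal
  omega

-- ===== VERDICT (by name: the statement is the Claim_ definition above) =====
theorem valida_piva_spec : Claim_equal_valida_piva := by
  intro piva _
  unfold Spec_valida_piva valida_piva valida_piva_alt
  by_cases h : (piva.toList = [] ∨ PySem.Str.strIsdigit piva = false ∨ PySem.Str.len piva ≠ 11)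
  · simp only [if_pos h]
  · simp only [if_neg h]
    push_neg at h
    obtain ⟨hne, hdig, hlen⟩ := h
    rw [PySem.Str.strIsdigit_eq] at hdig
    rw [PySem.Str.len_eq] at hlen
    rw [ne_eq, Bool.not_eq_false] at hdig
    set l := piva.toList with hl
    clear_value l
    have hlen' : l.length = 11 := by exact_mod_cast hlen
    rcases l with _|⟨c0,_|⟨c1,_|⟨c2,_|⟨c3,_|⟨c4,_|⟨c5,_|⟨c6,_|⟨c7,_|⟨c8,_|⟨c9,_|⟨c10,rest⟩⟩⟩⟩⟩⟩⟩⟩⟩⟩⟩ <;>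
      simp only [List.length_cons, List.length_nil] at hlen' <;> try omega
    have hrest : rest = [] := List.eq_nil_of_length_eq_zero (by omega)
    subst hrest
    simp only [PySem.Chars.strIsdigit, List.all_cons, List.all_nil, List.isEmpty_cons,
      Bool.not_false, Bool.true_and, Bool.and_eq_true, Bool.and_true] at hdig
    obtain ⟨hd0, hd1, hd2, hd3, hd4, hd5, hd6, hd7, hd8, hd9, hd10⟩ := hdig
    have hb := digitVal_bounds c10 hd10
    simp only [List.map_cons, List.map_nil]
    rw [show PySem.List.pyRange 0 10 1 = [0,1,2,3,4,5,6,7,8,9] from by decide]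
    simp only [List.foldl_cons, List.foldl_nil,
      show PySem.Int.mod (0+1) 2 = 1 from by decide, show PySem.Int.mod (1+1) 2 = 0 from by decide,
      show PySem.Int.mod (2+1) 2 = 1 from by decide, show PySem.Int.mod (3+1) 2 = 0 from by decide,
      show PySem.Int.mod (4+1) 2 = 1 from by decide, show PySem.Int.mod (5+1) 2 = 0 from by decide,
      show PySem.Int.mod (6+1) 2 = 1 from by decide, show PySem.Int.mod (7+1) 2 = 0 from by decide,
      show PySem.Int.mod (8+1) 2 = 1 from by decide, show PySem.Int.mod (9+1) 2 = 0 from by decide,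
      PySem.List.pyGetD_ofNat', List.getD_cons_zero, List.getD_cons_succ]
    simp only [show ((1:Int) = 0) = False from by simp,
      if_false, if_true]
    have hs1 : PySem.List.slice? [digitVal c0, digitVal c1, digitVal c2, digitVal c3,
        digitVal c4, digitVal c5, digitVal c6, digitVal c7, digitVal c8, digitVal c9,
        digitVal c10] (some 0) none 2
        = some [digitVal c0, digitVal c2, digitVal c4, digitVal c6, digitVal c8, digitVal c10] := by
      simp [PySem.List.slice?, PySem.List.sliceIndices, List.range_succ]
    have hs2 : PySem.List.slice? [digitVal c0, digitVal c1, digitVal c2, digitVal c3,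
        digitVal c4, digitVal c5, digitVal c6, digitVal c7, digitVal c8, digitVal c9,
        digitVal c10] (some 1) (some 10) 2
        = some [digitVal c1, digitVal c3, digitVal c5, digitVal c7, digitVal c9] := by
      simp [PySem.List.slice?, PySem.List.sliceIndices, List.range_succ]
    simp only [hs1, hs2]
    simp only [Option.getD_some, List.map_cons, List.map_nil, List.sum_cons, List.sum_nil,
      dbl_spec c1 hd1, dbl_spec c3 hd3, dbl_spec c5 hd5, dbl_spec c7 hd7, dbl_spec c9 hd9]
    exact final_step _ _ _ hb.1 hb.2 (by ring) _ _
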